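-- pv_equiv track=rewrite | github.com/clcriswell/LegAid | app.py | fallback_commendation
-- ===== SOURCE A (Python) =====
-- def fallback_commendation(name, title, org):
--     title_lower = title.lower()
--     if "award" in title_lower or "of the year" in title_lower or "honoree" in title_lower:
--         message = f"On behalf of the California State Legislature, congratulations on being recognized as {org}'s {title}. "
--     elif any(kw in title_lower for kw in ["president", "board", "officer", "service", "chair", "director"]):
--         message = f"On behalf of the California State Legislature, thank you for your service as {title} with {org}. "
--     elif "opening" in title_lower or "grand" in title_lower:
--         message = f"On behalf of the California State Legislature, congratulations on the opening of {org}. "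
--     elif "graduat" in title_lower:
--         message = f"On behalf of the California State Legislature, congratulations on successfully graduating from {org}. "
--     else:
--         message = f"On behalf of the California State Legislature, we commend you for your accomplishments with {org}. "
--     message += "This recognition speaks highly of your dedication and contributions to the community."
--     return message
-- ===== SOURCE B (Python) =====
-- SUFFIX = "This recognition speaks highly of your dedication and contributions to the community."
--
-- TEMPLATES = [
--     "On behalf of the California State Legislature, congratulations on being recognized as {org}'s {title}. ",
--     "On behalf of the California State Legislature, thank you for your service as {title} with {org}. ",
--     "On behalf of the California State Legislature, congratulations on the opening of {org}. ",
--     "On behalf of the California State Legislature, congratulations on successfully graduating from {org}. ",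
--     "On behalf of the California State Legislature, we commend you for your accomplishments with {org}. ",
-- ]
--
-- # flat keyword -> template-priority map (lower number = earlier branch in the cascade)
-- PRIORITY = {
--     "award": 0, "of the year": 0, "honoree": 0,
--     "president": 1, "board": 1, "officer": 1, "service": 1, "chair": 1, "director": 1,
--     "opening": 2, "grand": 2,
--     "graduat": 3,
-- }
--
--
-- def fallback_commendation(name, title, org):
--     t = title.lower()
--     hits = [(kw in t, p) for kw, p in PRIORITY.items()]
--     cat = min((p for ok, p in hits if ok), default=len(TEMPLATES) - 1)
--     return TEMPLATES[cat].format(org=org, title=title) + SUFFIX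
-- ===== Notes on version B (the rewrite author's own statement) =====
-- stated objective: alternative
-- what changed: Replaces the ordered if/elif cascade with a flat keyword-to-priority map: B marks every keyword that occurs in the title and picks the minimum matched priority as the template index, instead of testing grouped conditions in branch order.
import Mathlib
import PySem

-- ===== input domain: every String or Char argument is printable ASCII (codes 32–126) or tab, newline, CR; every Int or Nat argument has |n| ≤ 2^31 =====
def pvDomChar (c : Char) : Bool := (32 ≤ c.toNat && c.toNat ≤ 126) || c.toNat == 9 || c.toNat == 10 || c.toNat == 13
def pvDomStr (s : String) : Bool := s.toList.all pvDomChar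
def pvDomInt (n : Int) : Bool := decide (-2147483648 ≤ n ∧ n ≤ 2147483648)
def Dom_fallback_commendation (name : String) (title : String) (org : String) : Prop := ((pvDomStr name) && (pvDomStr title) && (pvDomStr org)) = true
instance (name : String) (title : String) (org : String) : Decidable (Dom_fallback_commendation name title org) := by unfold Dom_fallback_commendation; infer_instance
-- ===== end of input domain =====

-- B replaces A's ordered if/elif cascade by a flat keyword→priority map aggregated with min (alternative decomposition, same cost).

-- ===== PORT A =====
def fallback_commendation (name : String) (title : String) (org : String) : String :=
  let title_lower := PySem.Str.lower title
  let message :=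
    if PySem.Str.isIn "award" title_lower || PySem.Str.isIn "of the year" title_lower ||
        PySem.Str.isIn "honoree" title_lower then
      PySem.Str.join "" ["On behalf of the California State Legislature, congratulations on being recognized as ", org, "'s ", title, ". "]
    else if ["president", "board", "officer", "service", "chair", "director"].any
        (fun kw => PySem.Str.isIn kw title_lower) then
      PySem.Str.join "" ["On behalf of the California State Legislature, thank you for your service as ", title, " with ", org, ". "]
    else if PySem.Str.isIn "opening" title_lower || PySem.Str.isIn "grand" title_lower then
      PySem.Str.join "" ["On behalf of the California State Legislature, congratulations on the opening of ", org, ". "]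
    else if PySem.Str.isIn "graduat" title_lower then
      PySem.Str.join "" ["On behalf of the California State Legislature, congratulations on successfully graduating from ", org, ". "]
    else
      PySem.Str.join "" ["On behalf of the California State Legislature, we commend you for your accomplishments with ", org, ". "]
  PySem.Str.join "" [message, "This recognition speaks highly of your dedication and contributions to the community."]

-- ===== PORT B =====
def pvSuffix : String := "This recognition speaks highly of your dedication and contributions to the community."

-- TEMPLATES[cat].format(org=org, title=title): each template is a concatenation of its fixed
-- pieces and the placeholders (exact port of str.format on these templates), indexed by category
def pvTemplate (cat : Nat) (org : String) (title : String) : String :=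
  match cat with
  | 0 => PySem.Str.join "" ["On behalf of the California State Legislature, congratulations on being recognized as ", org, "'s ", title, ". "]
  | 1 => PySem.Str.join "" ["On behalf of the California State Legislature, thank you for your service as ", title, " with ", org, ". "]
  | 2 => PySem.Str.join "" ["On behalf of the California State Legislature, congratulations on the opening of ", org, ". "]
  | 3 => PySem.Str.join "" ["On behalf of the California State Legislature, congratulations on successfully graduating from ", org, ". "]
  | _ => PySem.Str.join "" ["On behalf of the California State Legislature, we commend you for your accomplishments with ", org, ". "]

-- the flat PRIORITY map, in insertion order
def pvPriority : List (String × Nat) :=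
  [("award", 0), ("of the year", 0), ("honoree", 0),
   ("president", 1), ("board", 1), ("officer", 1), ("service", 1), ("chair", 1), ("director", 1),
   ("opening", 2), ("grand", 2),
   ("graduat", 3)]

def fallback_commendation_alt (name : String) (title : String) (org : String) : String :=
  let t := PySem.Str.lower title
  -- hits = [(kw in t, p) for kw, p in PRIORITY.items()]
  let hits := pvPriority.map (fun kp => (PySem.Str.isIn kp.1 t, kp.2))
  -- cat = min((p for ok, p in hits if ok), default=len(TEMPLATES) - 1)
  let cat := (List.min? (hits.filterMap (fun bp => if bp.1 then some bp.2 else none))).getD 4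
  PySem.Str.join "" [pvTemplate cat org title, pvSuffix]

-- ===== PRECONDITION & SPEC =====
def Spec_fallback_commendation (name : String) (title : String) (org : String) (out : String) : Prop := out = fallback_commendation_alt name title org
instance (name : String) (title : String) (org : String) (out : String) : Decidable (Spec_fallback_commendation name title org out) := by unfold Spec_fallback_commendation; infer_instance

-- ===== CLAIM (what is proved, stated in full; the proofs are below) =====
def Claim_equal_fallback_commendation : Prop := ∀ (name : String) (title : String) (org : String), Dom_fallback_commendation name title org → Spec_fallback_commendation name title org (fallback_commendation name title org)

-- ===== LEMMAS AND PROOFS =====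

-- the filterMap function B uses
def pvF : Bool × Nat → Option Nat := fun bp => if bp.1 then some bp.2 else none

theorem pvFoldlMinMem (l : List Nat) : ∀ a : Nat, l.foldl min a ∈ a :: l := by
  induction l with
  | nil => intro a; simp [List.foldl]
  | cons b l ih =>
      intro a
      have hfold : List.foldl min a (b :: l) = List.foldl min (min a b) l := rfl
      rcases Nat.le_total a b with hab | hab
      · have h := ih a
        rw [hfold, Nat.min_eq_left hab]
        rcases List.mem_cons.mp h with h' | h' <;> simp [h']
      · have h := ih b
        rw [hfold, Nat.min_eq_right hab]
        rcases List.mem_cons.mp h with h' | h' <;> simp [h']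

theorem pvFoldlMinConst (l : List Nat) : ∀ m : Nat, (∀ y ∈ l, m ≤ y) → l.foldl min m = m := by
  induction l with
  | nil => intro m _; rfl
  | cons y l ih =>
      intro m h
      have hy : min m y = m := Nat.min_eq_left (h y (by simp))
      simp only [List.foldl, hy]
      exact ih m (fun z hz => h z (by simp [hz]))

theorem pvMinDCons (a : Nat) (l : List Nat) (d : Nat) :
    ((a :: l).min?).getD d = l.foldl min a := by
  simp [List.min?]

theorem pvMinDAppend (xs ys : List Nat) (d : Nat)
    (h : ∀ x ∈ xs, ∀ y ∈ ys, x ≤ y) :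
    ((xs ++ ys).min?).getD d = (xs.min?).getD ((ys.min?).getD d) := by
  cases xs with
  | nil => simp
  | cons a xs' =>
      rw [List.cons_append, pvMinDCons, pvMinDCons, List.foldl_append]
      exact pvFoldlMinConst ys _ (fun y hy => h _ (pvFoldlMinMem xs' a) y hy)

theorem pvMemConst (p : Nat) (bs : List Bool) {x : Nat}
    (h : x ∈ List.filterMap pvF (bs.map (fun b => (b, p)))) : x = p := by
  induction bs with
  | nil => simp at h
  | cons b bs ih =>
      cases b
      · rw [List.map_cons,
          show List.filterMap pvF ((false, p) :: List.map (fun b => (b, p)) bs)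
            = List.filterMap pvF (List.map (fun b => (b, p)) bs) from rfl] at h
        exact ih h
      · rw [List.map_cons,
          show List.filterMap pvF ((true, p) :: List.map (fun b => (b, p)) bs)
            = p :: List.filterMap pvF (List.map (fun b => (b, p)) bs) from rfl] at h
        rcases List.mem_cons.mp h with h' | h'
        · exact h'
        · exact ih h'

theorem pvGConst (p d : Nat) (bs : List Bool) :
    ((List.filterMap pvF (bs.map (fun b => (b, p)))).min?).getD d
      = if bs.any id then p else d := by
  induction bs with
  | nil => rfl
  | cons b bs ih =>
      cases b
      · rw [List.map_cons,
          show List.filterMap pvF ((false, p) :: List.map (fun b => (b, p)) bs)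
            = List.filterMap pvF (List.map (fun b => (b, p)) bs) from rfl, ih]
        simp
      · rw [List.map_cons,
          show List.filterMap pvF ((true, p) :: List.map (fun b => (b, p)) bs)
            = p :: List.filterMap pvF (List.map (fun b => (b, p)) bs) from rfl, pvMinDCons]
        have hL : List.foldl min p (List.filterMap pvF (List.map (fun b => (b, p)) bs)) = p :=
          pvFoldlMinConst _ p (fun y hy => by have := pvMemConst p bs hy; omega)
        rw [hL]
        simp

theorem pvCatEq (b1 b2 b3 b4 b5 b6 b7 b8 b9 b10 b11 b12 : Bool) :
    (List.min? (List.filterMap (fun bp : Bool × Nat => if bp.1 then some bp.2 else none)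
      [(b1,0),(b2,0),(b3,0),(b4,1),(b5,1),(b6,1),(b7,1),(b8,1),(b9,1),(b10,2),(b11,2),(b12,3)])).getD 4
    = (if b1 || (b2 || b3) then 0
       else if b4 || (b5 || (b6 || (b7 || (b8 || b9)))) then 1
       else if b10 || b11 then 2
       else if b12 then 3 else 4) := by
  have hb3 : ∀ x ∈ List.filterMap pvF (List.map (fun b => (b, (2:Nat))) [b10, b11]),
      ∀ y ∈ List.filterMap pvF (List.map (fun b => (b, (3:Nat))) [b12]), x ≤ y := by
    intro x hx y hy
    have := pvMemConst 2 [b10, b11] hx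
    have := pvMemConst 3 [b12] hy
    omega
  have hb2 : ∀ x ∈ List.filterMap pvF (List.map (fun b => (b, (1:Nat))) [b4, b5, b6, b7, b8, b9]),
      ∀ y ∈ (List.filterMap pvF (List.map (fun b => (b, (2:Nat))) [b10, b11])
             ++ List.filterMap pvF (List.map (fun b => (b, (3:Nat))) [b12])), x ≤ y := by
    intro x hx y hy
    have := pvMemConst 1 [b4, b5, b6, b7, b8, b9] hx
    rcases List.mem_append.mp hy with h' | h'
    · have := pvMemConst 2 [b10, b11] h'; omega
    · have := pvMemConst 3 [b12] h'; omega
  have hb1 : ∀ x ∈ List.filterMap pvF (List.map (fun b => (b, (0:Nat))) [b1, b2, b3]),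
      ∀ y ∈ (List.filterMap pvF (List.map (fun b => (b, (1:Nat))) [b4, b5, b6, b7, b8, b9])
             ++ (List.filterMap pvF (List.map (fun b => (b, (2:Nat))) [b10, b11])
                 ++ List.filterMap pvF (List.map (fun b => (b, (3:Nat))) [b12]))), x ≤ y := by
    intro x hx y _
    have := pvMemConst 0 [b1, b2, b3] hx
    omega
  rw [show ([(b1,0),(b2,0),(b3,0),(b4,1),(b5,1),(b6,1),(b7,1),(b8,1),(b9,1),(b10,2),(b11,2),(b12,3)] : List (Bool × Nat))
      = (List.map (fun b => (b, (0:Nat))) [b1, b2, b3])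
        ++ ((List.map (fun b => (b, (1:Nat))) [b4, b5, b6, b7, b8, b9])
            ++ ((List.map (fun b => (b, (2:Nat))) [b10, b11])
                ++ (List.map (fun b => (b, (3:Nat))) [b12]))) from rfl]
  show (List.min? (List.filterMap pvF _)).getD 4 = _
  rw [List.filterMap_append, List.filterMap_append, List.filterMap_append]
  rw [pvMinDAppend _ _ _ hb1, pvMinDAppend _ _ _ hb2, pvMinDAppend _ _ _ hb3]
  rw [pvGConst, pvGConst, pvGConst, pvGConst]
  simp [List.any_cons, List.any_nil]


-- ===== VERDICT (by name: the statement is the Claim_ definition above) =====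
theorem fallback_commendation_spec : Claim_equal_fallback_commendation := by
  intro name title org _
  unfold Spec_fallback_commendation fallback_commendation fallback_commendation_alt pvPriority pvSuffix
  dsimp only [List.map]
  rw [pvCatEq]
  simp only [List.any_cons, List.any_nil, Bool.or_false, Bool.or_assoc]
  split_ifs <;> rfl
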